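-- pv_equiv track=rewrite | github.com/DhruvVaghani/P2-Umber-Abby-Main | scripts/kb_index.py | chunk_markdown
-- ===== SOURCE A (Python) =====
-- def chunk_markdown(text: str, size: int = 350) -> list[tuple[str, str]]:
--     current_section = "overview"
--     current_text = ""
--     chunks: list[tuple[str, str]] = []
--
--     for line in text.splitlines():
--         if line.startswith("#"):
--             if current_text.strip():
--                 chunks.extend(split_large_chunk(current_section, current_text, size))
--                 current_text = ""
--             current_section = line.lstrip("#").strip() or "overview"
--             current_text = f"{line}\n"
--             continue
--
--         next_line = f"{line}\n"
--         if len(current_text) + len(next_line) > size and current_text.strip():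
--             chunks.append((current_section, current_text.strip()))
--             current_text = next_line
--         else:
--             current_text += next_line
--
--     if current_text.strip():
--         chunks.extend(split_large_chunk(current_section, current_text, size))
--
--     return chunks
--
-- def split_large_chunk(section: str, text: str, size: int) -> list[tuple[str, str]]:
--     if len(text) <= size:
--         return [(section, text.strip())]
--
--     parts: list[tuple[str, str]] = []
--     words = text.split()
--     current = ""
--     for word in words:
--         candidate = f"{current} {word}".strip()
--         if len(candidate) > size and current:
--             parts.append((section, current))
--             current = word
--         else:
--             current = candidate
--     if current:
--         parts.append((section, current))
--     return parts
-- ===== SOURCE B (Python) =====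
-- def split_large_chunk(section: str, text: str, size: int) -> list[tuple[str, str]]:
--     if len(text) <= size:
--         return [(section, text.strip())]
--
--     parts: list[tuple[str, str]] = []
--     words = text.split()
--     current = ""
--     for word in words:
--         candidate = f"{current} {word}".strip()
--         if len(candidate) > size and current:
--             parts.append((section, current))
--             current = word
--         else:
--             current = candidate
--     if current:
--         parts.append((section, current))
--     return parts
--
--
-- def _emit_group(section: str, lines: list[str], size: int) -> list[tuple[str, str]]:
--     """Chunk the lines of one section: line-accumulation with overflow emits,
--     leftover text goes through split_large_chunk."""
--     out: list[tuple[str, str]] = []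
--     current = ""
--     for line in lines:
--         nxt = f"{line}\n"
--         if len(current) + len(nxt) > size and current.strip():
--             out.append((section, current.strip()))
--             current = nxt
--         else:
--             current += nxt
--     if current.strip():
--         out.extend(split_large_chunk(section, current, size))
--     return out
--
--
-- def chunk_markdown(text: str, size: int = 350) -> list[tuple[str, str]]:
--     # Pass 1: split the line list into section groups at heading lines.
--     lines = text.splitlines()
--
--     def not_heading(l: str) -> bool:
--         return not l.startswith("#")
--
--     k = 0
--     while k < len(lines) and not_heading(lines[k]):
--         k += 1
--     groups: list[tuple[str, list[str]]] = [("overview", lines[:k])]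
--     rest = lines[k:]
--     while rest:
--         heading, tail = rest[0], rest[1:]
--         j = 0
--         while j < len(tail) and not_heading(tail[j]):
--             j += 1
--         section = heading.lstrip("#").strip() or "overview"
--         groups.append((section, [heading] + tail[:j]))
--         rest = tail[j:]
--
--     # Pass 2: chunk each group independently and concatenate.
--     chunks: list[tuple[str, str]] = []
--     for section, glines in groups:
--         chunks.extend(_emit_group(section, glines, size))
--     return chunks
-- ===== Notes on version B (the rewrite author's own statement) =====
-- stated objective: alternative
-- what changed: B replaces A's single stateful sweep (one fold carrying section, accumulator and chunks across heading boundaries) by a two-pass decomposition: pass 1 splits the line list into per-section groups at heading lines, pass 2 chunks each group independently and concatenates.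
import Mathlib
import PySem

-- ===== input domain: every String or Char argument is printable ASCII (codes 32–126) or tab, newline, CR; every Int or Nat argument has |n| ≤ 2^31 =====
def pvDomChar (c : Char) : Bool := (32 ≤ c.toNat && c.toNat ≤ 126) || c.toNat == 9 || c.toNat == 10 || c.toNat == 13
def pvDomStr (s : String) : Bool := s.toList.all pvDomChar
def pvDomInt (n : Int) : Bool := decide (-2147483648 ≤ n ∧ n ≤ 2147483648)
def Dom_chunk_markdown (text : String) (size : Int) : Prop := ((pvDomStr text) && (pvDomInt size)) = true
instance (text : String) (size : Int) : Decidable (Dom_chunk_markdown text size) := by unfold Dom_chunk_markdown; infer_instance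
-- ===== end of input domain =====

-- B re-chunks the text in two passes (group lines by section heading first, then chunk each
-- group independently) instead of A's single stateful sweep; objective: alternative decomposition.

-- ===== PORT A =====

-- shared helper (identical function in Source A and Source B): split_large_chunk
def split_large_chunk (sec : String) (text : String) (size : Int) : List (String × String) :=
  if PySem.Str.len text ≤ size then [(sec, PySem.Str.strip text)]
  else
    let words := PySem.Str.split₀ text
    let res := words.foldl (fun (st : List (String × String) × String) word =>
      let candidate := PySem.Str.strip (st.2 ++ " " ++ word)
      if PySem.Str.len candidate > size ∧ st.2 ≠ "" then (st.1 ++ [(sec, st.2)], word)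
      else (st.1, candidate)) ([], "")
    if res.2 ≠ "" then res.1 ++ [(sec, res.2)] else res.1

-- shared helper: line.lstrip("#").strip() or "overview"  (lstrip("#") ported by hand as a
-- dropWhile over the leading '#' characters — exact for this single-character strip set)
def pvSectionOf (line : String) : String :=
  let s := PySem.Str.strip (String.ofList (line.toList.dropWhile (· == '#')))
  if s = "" then "overview" else s

-- the body of A's for-loop, state = (current_section, current_text, chunks)
def pvAStep (size : Int) (st : String × String × List (String × String)) (line : String) :
    String × String × List (String × String) :=
  if PySem.Str.startswith line "#" then
    let chunks' := if PySem.Str.strip st.2.1 ≠ "" then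
        st.2.2 ++ split_large_chunk st.1 st.2.1 size else st.2.2
    (pvSectionOf line, line ++ "\n", chunks')
  else
    let nextLine := line ++ "\n"
    if PySem.Str.len st.2.1 + PySem.Str.len nextLine > size ∧ PySem.Str.strip st.2.1 ≠ "" then
      (st.1, nextLine, st.2.2 ++ [(st.1, PySem.Str.strip st.2.1)])
    else (st.1, st.2.1 ++ nextLine, st.2.2)

def chunk_markdown (text : String) (size : Int) : List (String × String) :=
  let fin := (PySem.Str.splitlines text).foldl (pvAStep size) ("overview", "", [])
  if PySem.Str.strip fin.2.1 ≠ "" then fin.2.2 ++ split_large_chunk fin.1 fin.2.1 size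
  else fin.2.2

-- ===== PORT B =====

def pvNotHeading (l : String) : Bool := !(PySem.Str.startswith l "#")

-- Source B pass 1, inner while loop: each heading opens a group holding the heading line and the
-- following non-heading lines (the index scans 'while j < len and not_heading' are span/takeWhile)
def pvGroupsLoop (rest : List String) : List (String × List String) :=
  match rest with
  | [] => []
  | heading :: tail =>
      (pvSectionOf heading, heading :: tail.takeWhile pvNotHeading) ::
        pvGroupsLoop (tail.dropWhile pvNotHeading)
termination_by rest.length
decreasing_by
  simpa using Nat.lt_succ_of_le (List.length_dropWhile_le pvNotHeading tail)

def pvGroups (lines : List String) : List (String × List String) :=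
  ("overview", lines.takeWhile pvNotHeading) :: pvGroupsLoop (lines.dropWhile pvNotHeading)

-- Source B _emit_group: chunk the lines of one section group (loop with accumulator → recursion)
def pvEmitGroup (size : Int) (sec : String) : List String → String → List (String × String)
  | [], cur => if PySem.Str.strip cur ≠ "" then split_large_chunk sec cur size else []
  | l :: ls, cur =>
      let nxt := l ++ "\n"
      if PySem.Str.len cur + PySem.Str.len nxt > size ∧ PySem.Str.strip cur ≠ "" then
        (sec, PySem.Str.strip cur) :: pvEmitGroup size sec ls nxt
      else pvEmitGroup size sec ls (cur ++ nxt)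

def chunk_markdown_alt (text : String) (size : Int) : List (String × String) :=
  (pvGroups (PySem.Str.splitlines text)).flatMap (fun g => pvEmitGroup size g.1 g.2 "")

-- ===== PRECONDITION & SPEC =====
def Spec_chunk_markdown (text : String) (size : Int) (out : List (String × String)) : Prop := out = chunk_markdown_alt text size
instance (text : String) (size : Int) (out : List (String × String)) : Decidable (Spec_chunk_markdown text size out) := by unfold Spec_chunk_markdown; infer_instance

-- ===== CLAIM (what is proved, stated in full; the proofs are below) =====
def Claim_equal_chunk_markdown : Prop := ∀ (text : String) (size : Int), Dom_chunk_markdown text size → Spec_chunk_markdown text size (chunk_markdown text size)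

-- ===== LEMMAS AND PROOFS =====

-- recursive characterisation of A: chunks emitted from state (sec, cur) over the remaining lines,
-- including the final split_large_chunk flush
def pvARest (size : Int) : String → String → List String → List (String × String)
  | sec, cur, [] => if PySem.Str.strip cur ≠ "" then split_large_chunk sec cur size else []
  | sec, cur, l :: ls =>
      if PySem.Str.startswith l "#" then
        (if PySem.Str.strip cur ≠ "" then split_large_chunk sec cur size else []) ++
          pvARest size (pvSectionOf l) (l ++ "\n") ls
      else
        let nxt := l ++ "\n"
        if PySem.Str.len cur + PySem.Str.len nxt > size ∧ PySem.Str.strip cur ≠ "" then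
          (sec, PySem.Str.strip cur) :: pvARest size sec nxt ls
        else pvARest size sec (cur ++ nxt) ls

lemma pvDropWhile_head {α : Type} (p : α → Bool) (l : List α) :
    ∀ h ∈ (l.dropWhile p).head?, p h = false := by
  induction l with
  | nil => simp
  | cons a t ih =>
    by_cases hp : p a
    · simpa [hp] using ih
    · simp [hp]

-- A's fold plus its final flush equals the recursive characterisation
lemma pvA_fold_eq (size : Int) (ls : List String) :
    ∀ sec cur chunks,
      (let fin := ls.foldl (pvAStep size) (sec, cur, chunks)
       if PySem.Str.strip fin.2.1 ≠ "" then fin.2.2 ++ split_large_chunk fin.1 fin.2.1 size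
       else fin.2.2)
      = chunks ++ pvARest size sec cur ls := by
  induction ls with
  | nil =>
    intro sec cur chunks
    simp only [List.foldl_nil, pvARest]
    split_ifs <;> simp
  | cons l ls ih =>
    intro sec cur chunks
    simp only [List.foldl_cons]
    by_cases h : PySem.Str.startswith l "#" = true
    · have hstep : pvAStep size (sec, cur, chunks) l
          = (pvSectionOf l, l ++ "\n",
             if PySem.Str.strip cur ≠ "" then chunks ++ split_large_chunk sec cur size
             else chunks) := by
        simp only [pvAStep]; rw [if_pos h]
      rw [hstep, ih]
      simp only [pvARest]; rw [if_pos h]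
      split_ifs <;> simp
    · by_cases hc : PySem.Str.len cur + PySem.Str.len (l ++ "\n") > size ∧
          PySem.Str.strip cur ≠ ""
      · have hstep : pvAStep size (sec, cur, chunks) l
            = (sec, l ++ "\n", chunks ++ [(sec, PySem.Str.strip cur)]) := by
          simp only [pvAStep]; rw [if_neg h, if_pos hc]
        rw [hstep, ih]
        simp only [pvARest]; rw [if_neg h, if_pos hc]
        simp
      · have hstep : pvAStep size (sec, cur, chunks) l
            = (sec, cur ++ (l ++ "\n"), chunks) := by
          simp only [pvAStep]; rw [if_neg h, if_neg hc]
        rw [hstep, ih]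
        simp only [pvARest]; rw [if_neg h, if_neg hc]

-- the main decomposition: A's remainder over (body ++ rest), with body heading-free and rest
-- empty or starting with a heading, equals B's group-by-group emission
lemma pvMain (size : Int) : ∀ (n : Nat) (body rest : List String),
    body.length + rest.length ≤ n →
    (∀ h ∈ rest.head?, pvNotHeading h = false) →
    (∀ l ∈ body, pvNotHeading l = true) →
    ∀ sec cur,
      pvARest size sec cur (body ++ rest) =
        pvEmitGroup size sec body cur ++
          (pvGroupsLoop rest).flatMap (fun g => pvEmitGroup size g.1 g.2 "") := by
  intro n
  induction n with
  | zero =>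
    intro body rest hlen hhead hbody sec cur
    have hb : body = [] := by cases body <;> simp_all
    have hr : rest = [] := by cases rest <;> simp_all
    subst hb; subst hr
    simp [pvARest, pvEmitGroup, pvGroupsLoop]
  | succ m ih =>
    intro body rest hlen hhead hbody sec cur
    cases body with
    | cons b bs =>
      have hbh : ¬ PySem.Str.startswith b "#" = true := by
        have := hbody b (by simp)
        simp [pvNotHeading] at this
        simp [this]
      have hbs : ∀ l ∈ bs, pvNotHeading l = true := fun l hl => hbody l (by simp [hl])
      have hlen2 : bs.length + rest.length ≤ m := by simp at hlen; omega
      have hrec := ih bs rest hlen2 hhead hbs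
      simp only [List.cons_append, pvARest, pvEmitGroup]
      rw [if_neg hbh]
      by_cases hc : PySem.Str.len cur + PySem.Str.len (b ++ "\n") > size ∧
          PySem.Str.strip cur ≠ ""
      · rw [if_pos hc, if_pos hc, hrec]
        simp
      · rw [if_neg hc, if_neg hc, hrec]
    | nil =>
      cases rest with
      | nil => simp [pvARest, pvEmitGroup, pvGroupsLoop]
      | cons h tail =>
        have hh : PySem.Str.startswith h "#" = true := by
          have := hhead h (by simp)
          simpa [pvNotHeading] using this
        have hlen2 : (tail.takeWhile pvNotHeading).length +
            (tail.dropWhile pvNotHeading).length ≤ m := by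
          rw [← List.length_append, List.takeWhile_append_dropWhile]
          simp at hlen; omega
        have step := ih (tail.takeWhile pvNotHeading) (tail.dropWhile pvNotHeading) hlen2
          (pvDropWhile_head pvNotHeading tail)
          (fun l hl => List.mem_takeWhile_imp hl)
          (pvSectionOf h) (h ++ "\n")
        rw [List.takeWhile_append_dropWhile] at step
        have hfirst : pvEmitGroup size (pvSectionOf h) (h :: tail.takeWhile pvNotHeading) "" =
            pvEmitGroup size (pvSectionOf h) (tail.takeWhile pvNotHeading) (h ++ "\n") := by
          have hguard : ¬ (PySem.Str.len "" + PySem.Str.len (h ++ "\n") > size ∧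
              PySem.Str.strip "" ≠ "") := fun hx => hx.2 rfl
          simp only [pvEmitGroup]
          rw [if_neg hguard, String.empty_append]
        have hgl : pvGroupsLoop (h :: tail)
            = (pvSectionOf h, h :: tail.takeWhile pvNotHeading) ::
                pvGroupsLoop (tail.dropWhile pvNotHeading) := by
          rw [pvGroupsLoop]
        rw [List.nil_append, pvARest]
        rw [if_pos hh, step, hgl, List.flatMap_cons, hfirst, pvEmitGroup]

-- ===== VERDICT (by name: the statement is the Claim_ definition above) =====
theorem chunk_markdown_spec : Claim_equal_chunk_markdown := by
  intro text size _
  unfold Spec_chunk_markdown chunk_markdown chunk_markdown_alt pvGroups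
  have hfold := pvA_fold_eq size (PySem.Str.splitlines text) "overview" "" []
  simp only [List.nil_append] at hfold
  have hmain := pvMain size (PySem.Str.splitlines text).length
    ((PySem.Str.splitlines text).takeWhile pvNotHeading)
    ((PySem.Str.splitlines text).dropWhile pvNotHeading)
    (by rw [← List.length_append, List.takeWhile_append_dropWhile])
    (pvDropWhile_head pvNotHeading _)
    (fun l hl => List.mem_takeWhile_imp hl)
    "overview" ""
  rw [List.takeWhile_append_dropWhile] at hmain
  rw [hfold, hmain]
  simp
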